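-- pv_equiv track=rewrite | github.com/jaysooo/Algorithm | problem-solving/etc/stunitas03/main.py | workAssignBuild
-- ===== SOURCE A (Python) =====
-- def isValidWork(group,work):
--     isValid=False
--     for it in group:
--         if ( it[0] < work[0] and it[1] <= work[0] and it[0] < work[1] and it[1] < work[1]):
--             isValid=True
--         elif ( it[0] > work[0] and it[1] > work[0] and it[0] >= work[1] and it[1] > work[1]):
--             isValid=True
--         else:
--             isValid=False
--
--     return isValid
--
-- def getMaxHour(workGroup):
--     maxHour=len(workGroup[0])
--     for i in workGroup:
--         if maxHour< len(i):
--             maxHour=len(i)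
--     return maxHour
--
-- def workAssignBuild(dailyWorks):
--     workGroups=list()
--     for it in dailyWorks:
--         newGroup = [it]
--
--         for w in workGroups:
--             if isValidWork(w,it):
--                 w.append(it)
--         workGroups.append(newGroup)
--
--     rs=getMaxHour(workGroups)
--     return rs
-- ===== SOURCE B (Python) =====
-- def _chainable(l, w):
--     return ((l[0] < w[0] and l[1] <= w[0] and l[0] < w[1] and l[1] < w[1])
--             or (l[0] > w[0] and l[1] > w[0] and l[0] >= w[1] and l[1] > w[1]))
--
--
-- def workAssignBuild(dailyWorks):
--     # Each group is summarized by (last element, size): A's validity flag is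
--     # overwritten on every member, so it only depends on the group's last element.
--     groups = []
--     for w in dailyWorks:
--         groups = [(w, s + 1) if _chainable(l, w) else (l, s) for (l, s) in groups]
--         groups.append((w, 1))
--     best = 0
--     for _, s in groups:
--         if s > best:
--             best = s
--     return best
-- ===== Notes on version B (the rewrite author's own statement) =====
-- stated objective: faster
-- what changed: A keeps every group as a full member list and rescans all members per candidate (its validity flag in fact only reflects the last member); B keeps only (last element, size) per group, making the per-group check O(1) and computing the max size in one accumulator pass.
-- crash fix: On the empty list A raises IndexError (getMaxHour indexes workGroup[0]); B returns 0. — e.g. on workAssignBuild([]): A raises IndexError, B returns 0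
import Mathlib
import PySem

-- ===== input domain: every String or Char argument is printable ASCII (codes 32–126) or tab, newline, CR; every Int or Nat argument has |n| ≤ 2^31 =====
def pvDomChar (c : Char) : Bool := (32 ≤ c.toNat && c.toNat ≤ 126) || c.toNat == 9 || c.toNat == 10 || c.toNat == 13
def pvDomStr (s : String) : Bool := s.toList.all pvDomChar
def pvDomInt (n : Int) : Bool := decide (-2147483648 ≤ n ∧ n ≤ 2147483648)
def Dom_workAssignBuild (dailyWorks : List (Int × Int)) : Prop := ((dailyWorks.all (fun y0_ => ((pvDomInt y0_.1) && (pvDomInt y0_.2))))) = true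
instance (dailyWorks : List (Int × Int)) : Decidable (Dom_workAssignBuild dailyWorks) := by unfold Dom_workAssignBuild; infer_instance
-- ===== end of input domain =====

-- B keeps only (last element, size) per group instead of full member lists (A's
-- validity flag only reflects the last member), dropping the inner member scan.

-- ===== PORT A =====
def isValidWork (group : List (Int × Int)) (work : Int × Int) : Bool :=
  group.foldl (fun _isValid it =>
    if it.1 < work.1 ∧ it.2 ≤ work.1 ∧ it.1 < work.2 ∧ it.2 < work.2 then true
    else if it.1 > work.1 ∧ it.2 > work.1 ∧ it.1 ≥ work.2 ∧ it.2 > work.2 then true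
    else false) false

-- workGroup[0] raises IndexError on the empty list; Pre_ excludes that input
def getMaxHour (workGroup : List (List (Int × Int))) : Int :=
  workGroup.foldl
    (fun maxHour i => if maxHour < (i.length : Int) then (i.length : Int) else maxHour)
    ((workGroup.headD []).length : Int)

def workAssignStep (workGroups : List (List (Int × Int))) (it : Int × Int) :
    List (List (Int × Int)) :=
  (workGroups.map (fun w => if isValidWork w it then w ++ [it] else w)) ++ [[it]]

def workAssignBuild (dailyWorks : List (Int × Int)) : Int :=
  getMaxHour (dailyWorks.foldl workAssignStep [])

-- ===== PORT B =====
def chainable (l w : Int × Int) : Bool :=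
  (decide (l.1 < w.1) && decide (l.2 ≤ w.1) && decide (l.1 < w.2) && decide (l.2 < w.2)) ||
  (decide (l.1 > w.1) && decide (l.2 > w.1) && decide (l.1 ≥ w.2) && decide (l.2 > w.2))

def altStep (groups : List ((Int × Int) × Int)) (w : Int × Int) :
    List ((Int × Int) × Int) :=
  (groups.map (fun p => if chainable p.1 w then (w, p.2 + 1) else p)) ++ [(w, 1)]

def workAssignBuild_alt (dailyWorks : List (Int × Int)) : Int :=
  (dailyWorks.foldl altStep []).foldl
    (fun best p => if p.2 > best then p.2 else best) 0

-- ===== PRECONDITION & SPEC =====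
-- A raises IndexError on the empty list (getMaxHour indexes workGroup[0])
def Pre_workAssignBuild (dailyWorks : List (Int × Int)) : Prop := dailyWorks ≠ []
instance (dailyWorks : List (Int × Int)) : Decidable (Pre_workAssignBuild dailyWorks) := by
  unfold Pre_workAssignBuild; infer_instance
def pvWitness_workAssignBuild : (List (Int × Int)) := [((1 : Int), (2 : Int))]

-- On the empty list A raises IndexError (getMaxHour indexes workGroup[0]); B returns 0.
def Raises_workAssignBuild (dailyWorks : List (Int × Int)) : Prop := dailyWorks = []
instance (dailyWorks : List (Int × Int)) : Decidable (Raises_workAssignBuild dailyWorks) := by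
  unfold Raises_workAssignBuild; infer_instance
def pvRaiseWitness_workAssignBuild : (List (Int × Int)) := []
def pvRaiseWitnessOut_workAssignBuild : Int := 0

def Spec_workAssignBuild (dailyWorks : List (Int × Int)) (out : Int) : Prop := out = workAssignBuild_alt dailyWorks
instance (dailyWorks : List (Int × Int)) (out : Int) : Decidable (Spec_workAssignBuild dailyWorks out) := by unfold Spec_workAssignBuild; infer_instance

-- ===== CLAIM (what is proved, stated in full; the proofs are below) =====
def Claim_equal_workAssignBuild : Prop := ∀ (dailyWorks : List (Int × Int)), Dom_workAssignBuild dailyWorks → Pre_workAssignBuild dailyWorks → Spec_workAssignBuild dailyWorks (workAssignBuild dailyWorks)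
def Claim_raises_workAssignBuild : Prop := (∀ (dailyWorks : List (Int × Int)), Dom_workAssignBuild dailyWorks → Raises_workAssignBuild dailyWorks → ¬ Pre_workAssignBuild dailyWorks) ∧ (Dom_workAssignBuild (pvRaiseWitness_workAssignBuild) ∧ Raises_workAssignBuild (pvRaiseWitness_workAssignBuild) ∧ workAssignBuild_alt (pvRaiseWitness_workAssignBuild) = pvRaiseWitnessOut_workAssignBuild)

-- ===== LEMMAS AND PROOFS =====

def toPair (g : List (Int × Int)) : (Int × Int) × Int := (g.getLastD (0, 0), (g.length : Int))

-- A's fold over the group only reflects its last element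
theorem isValidWork_eq_chainable_last (g : List (Int × Int)) (w : Int × Int) (h : g ≠ []) :
    isValidWork g w = chainable (g.getLastD (0, 0)) w := by
  have key : ∀ (g : List (Int × Int)) (acc : Bool) (d : Int × Int),
      g ≠ [] → g.foldl (fun _isValid it =>
        if it.1 < w.1 ∧ it.2 ≤ w.1 ∧ it.1 < w.2 ∧ it.2 < w.2 then true
        else if it.1 > w.1 ∧ it.2 > w.1 ∧ it.1 ≥ w.2 ∧ it.2 > w.2 then true
        else false) acc = chainable (g.getLastD d) w := by
    intro g
    induction g with
    | nil => intro _ _ h; exact absurd rfl h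
    | cons x xs ih =>
      intro acc d _
      cases xs with
      | nil =>
        simp only [List.foldl, List.getLastD]
        split_ifs with h1 h2 <;> simp [chainable] <;> omega
      | cons y ys =>
        have := ih (acc := if x.1 < w.1 ∧ x.2 ≤ w.1 ∧ x.1 < w.2 ∧ x.2 < w.2 then true
          else if x.1 > w.1 ∧ x.2 > w.1 ∧ x.1 ≥ w.2 ∧ x.2 > w.2 then true else false)
          (d := x) (by simp)
        simpa [List.foldl, List.getLastD_cons] using this
  exact key g false (0, 0) h

theorem toPair_step (g : List (Int × Int)) (w : Int × Int) (h : g ≠ []) :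
    toPair (if isValidWork g w then g ++ [w] else g)
      = (if chainable (toPair g).1 w then (w, (toPair g).2 + 1) else toPair g) := by
  rw [isValidWork_eq_chainable_last g w h]
  simp only [toPair]
  by_cases hc : chainable (g.getLastD (0, 0)) w = true
  · rw [if_pos hc, if_pos hc]
    simp [List.getLastD_eq_getLast?]
  · rw [if_neg hc, if_neg hc]

-- the main invariant: B's state is A's state summarized by toPair
theorem fold_invariant (dw : List (Int × Int)) (wg : List (List (Int × Int)))
    (hne : ∀ g ∈ wg, g ≠ []) :
    (dw.foldl altStep (wg.map toPair) = (dw.foldl workAssignStep wg).map toPair)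
      ∧ ∀ g ∈ dw.foldl workAssignStep wg, g ≠ [] := by
  induction dw generalizing wg with
  | nil => exact ⟨rfl, hne⟩
  | cons w dw ih =>
    have hstep : altStep (wg.map toPair) w = (workAssignStep wg w).map toPair := by
      simp only [altStep, workAssignStep, List.map_append, List.map_map, List.map_cons,
        List.map_nil]
      congr 1
      apply List.map_congr_left
      intro g hg
      simp only [Function.comp]
      exact (toPair_step g w (hne g hg)).symm
    have hne' : ∀ g ∈ workAssignStep wg w, g ≠ [] := by
      intro g hg
      simp only [workAssignStep, List.mem_append, List.mem_map, List.mem_cons] at hg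
      rcases hg with ⟨a, ha, rfl⟩ | hg
      · split <;> simp_all
      · simp_all
    have := ih (workAssignStep wg w) hne'
    simpa [List.foldl_cons, hstep] using this

theorem fold_length (dw : List (Int × Int)) (wg : List (List (Int × Int))) :
    (dw.foldl workAssignStep wg).length = wg.length + dw.length := by
  induction dw generalizing wg with
  | nil => simp
  | cons w dw ih => simp [List.foldl_cons, ih, workAssignStep]; omega

-- ===== VERDICT (by name: the statement is the Claim_ definition above) =====
theorem workAssignBuild_spec : Claim_equal_workAssignBuild := by
  intro dw _ hpre
  unfold Spec_workAssignBuild workAssignBuild workAssignBuild_alt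
  obtain ⟨hinv, hne⟩ := fold_invariant dw [] (by simp)
  simp only [List.map_nil] at hinv
  rw [hinv]
  set wg := dw.foldl workAssignStep [] with hwg
  have hlen : wg.length = dw.length := by simpa using fold_length dw []
  cases hwgc : wg with
  | nil => exfalso; apply hpre; rw [hwgc] at hlen; exact List.length_eq_zero_iff.mp hlen.symm
  | cons g0 rest =>
    have hg0 : g0 ≠ [] := hne g0 (by rw [hwgc]; exact List.mem_cons_self ..)
    have hg0len : (1 : Int) ≤ (g0.length : Int) := by
      have := List.length_pos_iff.mpr hg0; omega
    simp only [List.map_cons, List.foldl_cons, getMaxHour, List.headD, toPair, List.foldl_map]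
    rw [if_neg (by omega : ¬ ((g0.length : Int) < (g0.length : Int))),
      if_pos (by omega : ((g0.length : Int) > 0))]

@[simp]
theorem workAssignBuild_raises : Claim_raises_workAssignBuild := by
  unfold Claim_raises_workAssignBuild
  exact ⟨fun dw _ hr => by simp [Raises_workAssignBuild] at hr; simp [Pre_workAssignBuild, hr],
    by decide⟩
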